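-- pv_equiv track=rewrite | github.com/deeptools/deepTools | deeptools/heatmapper.py | chopRegionsFromMiddle
-- ===== SOURCE A (Python) =====
-- from copy import deepcopy
--
-- def chopRegionsFromMiddle(exonsInput, left=0, right=0):
--     """
--     Like chopRegions(), above, but returns two lists of tuples on each side of
--     the center point of the exons.
--
--     The steps are as follow:
--
--      1) Find the center point of the set of exons (e.g., [(0, 200), (300, 400), (800, 900)] would be centered at 200)
--        * If a given exon spans the center point then the exon is split
--      2) The given number of bases at the end of the left-of-center list are extracted
--        * If the set of exons don't contain enough bases, then padLeft is incremented accordingly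
--      3) As above but for the right-of-center list
--      4) A tuple of (#2, #3, pading on the left, and padding on the right) is returned
--     """
--     leftBins = []
--     rightBins = []
--     size = sum([x[1] - x[0] for x in exonsInput])
--     middle = size // 2
--     cumulativeSum = 0
--     padLeft = 0
--     padRight = 0
--     exons = deepcopy(exonsInput)
--
--     # Split exons in half
--     for exon in exons:
--         size = exon[1] - exon[0]
--         if cumulativeSum >= middle:
--             rightBins.append(exon)
--         elif cumulativeSum + size < middle:
--             leftBins.append(exon)
--         else:
--             # Don't add 0-width exonic bins!
--             if exon[0] < exon[1] - cumulativeSum - size + middle: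
--                 leftBins.append((exon[0], exon[1] - cumulativeSum - size + middle))
--             if exon[1] - cumulativeSum - size + middle < exon[1]:
--                 rightBins.append((exon[1] - cumulativeSum - size + middle, exon[1]))
--         cumulativeSum += size
--
--     # Trim leftBins/adjust padLeft
--     lSum = sum([x[1] - x[0] for x in leftBins])
--     if lSum > left:
--         lSum = 0
--         for i, exon in enumerate(leftBins[::-1]):
--             size = exon[1] - exon[0]
--             if lSum + size > left:
--                 leftBins[-i - 1] = (exon[1] + lSum - left, exon[1])
--                 break
--             lSum += size
--             if lSum == left:
--                 break
--         i += 1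
--         if i < len(leftBins):
--             leftBins = leftBins[-i:]
--     elif lSum < left:
--         padLeft = left - lSum
--
--     # Trim rightBins/adjust padRight
--     rSum = sum([x[1] - x[0] for x in rightBins])
--     if rSum > right:
--         rSum = 0
--         for i, exon in enumerate(rightBins):
--             size = exon[1] - exon[0]
--             if rSum + size > right:
--                 rightBins[i] = (exon[0], exon[1] - rSum - size + right)
--                 break
--             rSum += size
--             if rSum == right:
--                 break
--         rightBins = rightBins[:i + 1]
--     elif rSum < right:
--         padRight = right - rSum
--
--     return leftBins, rightBins, padLeft, padRight
-- ===== SOURCE B (Python) =====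
-- def _cumsums(bins):
--     accs, c = [], 0
--     for s, e in bins:
--         c += e - s
--         accs.append(c)
--     return accs
--
-- def _chopHead(bins, amount):
--     # keep the first `amount` flattened bases of bins (clipping the boundary bin),
--     # or report how many bases are missing
--     accs = _cumsums(bins)
--     total = accs[-1] if accs else 0
--     if total <= amount:
--         return bins, amount - total
--     k = next(i for i, a in enumerate(accs) if a >= amount)
--     s, e = bins[k]
--     return bins[:k] + [(s, e - (accs[k] - amount))], 0
--
-- def _chopTail(bins, amount):
--     # keep the last `amount` flattened bases of bins
--     accs = _cumsums(bins[::-1])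
--     total = accs[-1] if accs else 0
--     if total <= amount:
--         return bins, amount - total
--     k = next(i for i, a in enumerate(accs) if a >= amount)
--     s, e = bins[len(bins) - 1 - k]
--     return [(s + (accs[k] - amount), e)] + bins[len(bins) - k:], 0
--
-- def chopRegionsFromMiddle(exonsInput, left=0, right=0):
--     size = sum(e - s for s, e in exonsInput)
--     middle = size // 2
--     # single pass: each exon's left-of-middle / right-of-middle piece in closed form
--     lp, rp = [], []
--     c = 0
--     for s, e in exonsInput:
--         d = c + (e - s)
--         if c < middle:
--             lp.append((s, min(e, s + middle - c)))
--         if c >= middle or d > middle: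
--             rp.append((max(s, s + middle - c), e))
--         c = d
--     leftBins, padLeft = _chopTail(lp, left)
--     rightBins, padRight = _chopHead(rp, right)
--     return leftBins, rightBins, padLeft, padRight
-- ===== Notes on version B (the rewrite author's own statement) =====
-- stated objective: alternative
-- what changed: B replaces A's deepcopy + three interleaved passes (3-branch split loop, then two break/mutate/slice trim loops) by one flattened-coordinate pass that emits each exon's left/right piece in closed form (min/max), plus a shared pure chop helper that materializes the cumulative sums once, locates the cut as a first-crossing index and builds the clipped result arithmetically without mutating any list.
import Mathlib
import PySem

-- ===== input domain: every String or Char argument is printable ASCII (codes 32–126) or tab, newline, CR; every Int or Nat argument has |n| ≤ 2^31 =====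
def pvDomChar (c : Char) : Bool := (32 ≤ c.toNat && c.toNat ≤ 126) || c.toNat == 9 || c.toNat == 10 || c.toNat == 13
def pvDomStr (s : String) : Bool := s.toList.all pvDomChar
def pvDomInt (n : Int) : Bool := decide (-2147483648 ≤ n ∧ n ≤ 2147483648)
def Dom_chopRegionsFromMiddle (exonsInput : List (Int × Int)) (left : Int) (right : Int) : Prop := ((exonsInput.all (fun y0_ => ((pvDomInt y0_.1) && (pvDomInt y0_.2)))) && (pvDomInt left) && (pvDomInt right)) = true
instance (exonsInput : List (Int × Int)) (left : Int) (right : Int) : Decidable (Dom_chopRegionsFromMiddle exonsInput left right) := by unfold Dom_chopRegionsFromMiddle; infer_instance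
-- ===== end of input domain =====

-- B replaces A's deepcopy + three interleaved passes by one flattened-coordinate pass
-- (closed-form pieces) plus a shared pure chop helper (cumulative sums, first-crossing
-- cut index); return-value equivalence, neither version observably mutates its argument.

-- sum([x[1] - x[0] for x in l])  (the size expression both Pythons share)
def pvSumW (l : List (Int × Int)) : Int := (l.map (fun x => x.2 - x.1)).sum

-- ===== PORT A =====
-- one iteration of A's "Split exons in half" loop; state (leftBins, rightBins, cumulativeSum)
def aStep (middle : Int) (st : List (Int × Int) × List (Int × Int) × Int) (exon : Int × Int) :
    List (Int × Int) × List (Int × Int) × Int :=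
  let size := exon.2 - exon.1
  if st.2.2 ≥ middle then (st.1, st.2.1 ++ [exon], st.2.2 + size)
  else if st.2.2 + size < middle then (st.1 ++ [exon], st.2.1, st.2.2 + size)
  else
    ((if exon.1 < exon.2 - st.2.2 - size + middle then st.1 ++ [(exon.1, exon.2 - st.2.2 - size + middle)] else st.1),
     (if exon.2 - st.2.2 - size + middle < exon.2 then st.2.1 ++ [(exon.2 - st.2.2 - size + middle, exon.2)] else st.2.1),
     st.2.2 + size)

-- A's 'Trim leftBins' loop over leftBins[::-1]: returns (break index i, replacement for leftBins[-i-1] if any);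
-- none = the loop fell through without break
def aTrimL : List (Int × Int) → Nat → Int → Int → Option (Nat × Option (Int × Int))
  | [], _, _, _ => none
  | x :: rest, i, lSum, left =>
    let size := x.2 - x.1
    if lSum + size > left then some (i, some (x.2 + lSum - left, x.2))
    else if lSum + size = left then some (i, none)
    else aTrimL rest (i + 1) (lSum + size) left

-- A's 'Trim rightBins' loop (forward): returns (break index i, replacement for rightBins[i] if any)
def aTrimR : List (Int × Int) → Nat → Int → Int → Option (Nat × Option (Int × Int))
  | [], _, _, _ => none
  | x :: rest, i, rSum, right =>
    let size := x.2 - x.1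
    if rSum + size > right then some (i, some (x.1, x.2 - rSum - size + right))
    else if rSum + size = right then some (i, none)
    else aTrimR rest (i + 1) (rSum + size) right

-- A's 'Trim leftBins/adjust padLeft' block (verbatim structure of the Python block)
def aLeftBlock (leftBins : List (Int × Int)) (left : Int) : List (Int × Int) × Int :=
  let lSum := pvSumW leftBins
  if lSum > left then
    match aTrimL leftBins.reverse 0 0 left with
    | some (i, repl) =>
        let lb := match repl with
                  | some p => leftBins.set (leftBins.length - 1 - i) p
                  | none => leftBins
        (if i + 1 < lb.length then lb.drop (lb.length - (i + 1)) else lb, 0)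
    | none => (leftBins, 0)  -- Python raises NameError here when leftBins = [] (outside Pre_); nonempty fall-through leaves leftBins unchanged
  else if lSum < left then (leftBins, left - lSum)
  else (leftBins, 0)

-- A's 'Trim rightBins/adjust padRight' block
def aRightBlock (rightBins : List (Int × Int)) (right : Int) : List (Int × Int) × Int :=
  let rSum := pvSumW rightBins
  if rSum > right then
    match aTrimR rightBins 0 0 right with
    | some (i, repl) =>
        ((match repl with
          | some p => rightBins.set i p
          | none => rightBins).take (i + 1), 0)
    | none => (rightBins, 0)  -- Python raises NameError here when rightBins = [] (outside Pre_); nonempty fall-through slices rightBins[:len] = rightBins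
  else if rSum < right then (rightBins, right - rSum)
  else (rightBins, 0)

def chopRegionsFromMiddle (exonsInput : List (Int × Int)) (left : Int) (right : Int) :
    (List (Int × Int)) × (List (Int × Int)) × Int × Int :=
  let size := pvSumW exonsInput
  let middle := PySem.Int.floordiv size 2
  let st := exonsInput.foldl (aStep middle) ([], [], 0)
  let lRes := aLeftBlock st.1 left
  let rRes := aRightBlock st.2.1 right
  (lRes.1, rRes.1, lRes.2, rRes.2)

-- ===== PORT B =====
-- the accs/c loop of B's _cumsums helper
def pvCumsums (bins : List (Int × Int)) : List Int :=
  (bins.foldl (fun st x => (st.1 ++ [st.2 + (x.2 - x.1)], st.2 + (x.2 - x.1))) ([], 0)).1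

-- B's _chopHead: keep the first `amount` flattened bases (clip the boundary bin) or pad
def bChopHead (bins : List (Int × Int)) (amount : Int) : List (Int × Int) × Int :=
  let accs := pvCumsums bins
  let total := accs.getLast?.getD 0
  if total ≤ amount then (bins, amount - total)
  else
    match accs.findIdx? (fun a => decide (amount ≤ a)) with
    | some k =>
        let p := bins.getD k (0, 0)
        (bins.take k ++ [(p.1, p.2 - (accs.getD k 0 - amount))], 0)
    | none => (bins, 0)  -- Python's next() raises StopIteration here, only when bins = [] (outside Pre_)

-- B's _chopTail: keep the last `amount` flattened bases or pad
def bChopTail (bins : List (Int × Int)) (amount : Int) : List (Int × Int) × Int :=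
  let accs := pvCumsums bins.reverse
  let total := accs.getLast?.getD 0
  if total ≤ amount then (bins, amount - total)
  else
    match accs.findIdx? (fun a => decide (amount ≤ a)) with
    | some k =>
        let p := bins.getD (bins.length - 1 - k) (0, 0)
        ((p.1 + (accs.getD k 0 - amount), p.2) :: bins.drop (bins.length - k), 0)
    | none => (bins, 0)  -- Python's next() raises StopIteration here, only when bins = [] (outside Pre_)

-- one iteration of B's single split pass; state (lp, rp, c)
def bStep (middle : Int) (st : List (Int × Int) × List (Int × Int) × Int) (x : Int × Int) :
    List (Int × Int) × List (Int × Int) × Int :=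
  let c := st.2.2
  let d := c + (x.2 - x.1)
  ((if c < middle then st.1 ++ [(x.1, min x.2 (x.1 + middle - c))] else st.1),
   (if c ≥ middle ∨ d > middle then st.2.1 ++ [(max x.1 (x.1 + middle - c), x.2)] else st.2.1),
   d)

def chopRegionsFromMiddle_alt (exonsInput : List (Int × Int)) (left : Int) (right : Int) :
    (List (Int × Int)) × (List (Int × Int)) × Int × Int :=
  let size := pvSumW exonsInput
  let middle := PySem.Int.floordiv size 2
  let st := exonsInput.foldl (bStep middle) ([], [], 0)
  let lRes := bChopTail st.1 left
  let rRes := bChopHead st.2.1 right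
  (lRes.1, rRes.1, lRes.2, rRes.2)

-- ===== PRECONDITION & SPEC =====
-- prefix-sum shape tests: does any exon start strictly before / reach strictly beyond
-- the flattened middle? (c = running flattened coordinate, m = middle)
def pvHasLeftPiece : List (Int × Int) → Int → Int → Bool
  | [], _, _ => false
  | x :: r, c, m => decide (c < m) || pvHasLeftPiece r (c + (x.2 - x.1)) m
def pvHasRightPiece : List (Int × Int) → Int → Int → Bool
  | [], _, _ => false
  | x :: r, c, m => decide (c ≥ m) || decide (c + (x.2 - x.1) > m) || pvHasRightPiece r (c + (x.2 - x.1)) m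

-- Pre_ excludes exactly the inputs on which the Python A raises NameError:
-- a negative `left` with no exonic base left of the middle, or a negative `right`
-- with no exonic base at or right of the middle.
def Pre_chopRegionsFromMiddle (exonsInput : List (Int × Int)) (left : Int) (right : Int) : Prop :=
  (left < 0 → pvHasLeftPiece exonsInput 0 (PySem.Int.floordiv (pvSumW exonsInput) 2) = true) ∧
  (right < 0 → pvHasRightPiece exonsInput 0 (PySem.Int.floordiv (pvSumW exonsInput) 2) = true)
instance (exonsInput : List (Int × Int)) (left : Int) (right : Int) : Decidable (Pre_chopRegionsFromMiddle exonsInput left right) := by unfold Pre_chopRegionsFromMiddle; infer_instance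

def pvWitness_chopRegionsFromMiddle : (List (Int × Int)) × Int × Int := ([(0, 4), (6, 10)], 2, 3)

def Spec_chopRegionsFromMiddle (exonsInput : List (Int × Int)) (left : Int) (right : Int)
    (out : (List (Int × Int)) × (List (Int × Int)) × Int × Int) : Prop :=
  out = chopRegionsFromMiddle_alt exonsInput left right
instance (exonsInput : List (Int × Int)) (left : Int) (right : Int) (out : (List (Int × Int)) × (List (Int × Int)) × Int × Int) : Decidable (Spec_chopRegionsFromMiddle exonsInput left right out) := by unfold Spec_chopRegionsFromMiddle; infer_instance

-- ===== CLAIM (what is proved, stated in full; the proofs are below) =====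
def Claim_equal_chopRegionsFromMiddle : Prop := ∀ (exonsInput : List (Int × Int)) (left : Int) (right : Int), Dom_chopRegionsFromMiddle exonsInput left right → Pre_chopRegionsFromMiddle exonsInput left right → Spec_chopRegionsFromMiddle exonsInput left right (chopRegionsFromMiddle exonsInput left right)

-- ===== LEMMAS AND PROOFS =====

theorem pvSumW_nil : pvSumW [] = 0 := rfl
theorem pvSumW_cons (x : Int × Int) (l : List (Int × Int)) : pvSumW (x :: l) = (x.2 - x.1) + pvSumW l := by
  simp [pvSumW]
theorem pvSumW_reverse (l : List (Int × Int)) : pvSumW l.reverse = pvSumW l := by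
  simp [pvSumW]

-- recursive specification of B's _cumsums loop
def cumsRec : List (Int × Int) → Int → List Int
  | [], _ => []
  | x :: r, c => (c + (x.2 - x.1)) :: cumsRec r (c + (x.2 - x.1))

theorem cums_foldl : ∀ (l : List (Int × Int)) (accs : List Int) (c : Int),
    (l.foldl (fun st x => (st.1 ++ [st.2 + (x.2 - x.1)], st.2 + (x.2 - x.1))) (accs, c)).1
      = accs ++ cumsRec l c := by
  intro l
  induction l with
  | nil => intro accs c; simp [cumsRec]
  | cons x r ih =>
      intro accs c
      rw [List.foldl_cons, ih, cumsRec]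
      simp

theorem pvCumsums_eq (l : List (Int × Int)) : pvCumsums l = cumsRec l 0 := by
  unfold pvCumsums
  rw [cums_foldl]
  simp

theorem cumsRec_length : ∀ (l : List (Int × Int)) (c : Int), (cumsRec l c).length = l.length := by
  intro l
  induction l with
  | nil => intro c; rfl
  | cons x r ih => intro c; simp [cumsRec, ih]

theorem cumsRec_getLast : ∀ (l : List (Int × Int)) (c : Int), l ≠ [] →
    (cumsRec l c).getLast? = some (c + pvSumW l) := by
  intro l
  induction l with
  | nil => intro c h; exact absurd rfl h
  | cons x r ih =>
      intro c _
      rcases r with _ | ⟨y, ys⟩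
      · simp [cumsRec, pvSumW_cons, pvSumW_nil]
      · have h2 := ih (c + (x.2 - x.1)) (by simp)
        rw [cumsRec,
          show cumsRec (y :: ys) (c + (x.2 - x.1))
            = ((c + (x.2 - x.1)) + (y.2 - y.1)) :: cumsRec ys ((c + (x.2 - x.1)) + (y.2 - y.1)) from rfl,
          List.getLast?_cons_cons,
          ← show cumsRec (y :: ys) (c + (x.2 - x.1))
            = ((c + (x.2 - x.1)) + (y.2 - y.1)) :: cumsRec ys ((c + (x.2 - x.1)) + (y.2 - y.1)) from rfl,
          h2]
        simp only [pvSumW_cons, Option.some.injEq]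
        omega

-- cons unfoldings of the two scan loops (definitional)
theorem aTrimR_cons (x : Int × Int) (rest : List (Int × Int)) (i : Nat) (acc right : Int) :
    aTrimR (x :: rest) i acc right =
      if acc + (x.2 - x.1) > right then some (i, some (x.1, x.2 - acc - (x.2 - x.1) + right))
      else if acc + (x.2 - x.1) = right then some (i, none)
      else aTrimR rest (i + 1) (acc + (x.2 - x.1)) right := rfl

theorem aTrimL_cons (x : Int × Int) (rest : List (Int × Int)) (i : Nat) (acc left : Int) :
    aTrimL (x :: rest) i acc left =
      if acc + (x.2 - x.1) > left then some (i, some (x.2 + acc - left, x.2))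
      else if acc + (x.2 - x.1) = left then some (i, none)
      else aTrimL rest (i + 1) (acc + (x.2 - x.1)) left := rfl

-- BRIDGE: A's forward scan = first crossing of the cumulative sums
theorem bridgeR : ∀ (l : List (Int × Int)) (i : Nat) (acc amount : Int),
    aTrimR l i acc amount =
      match (cumsRec l acc).findIdx? (fun a => decide (amount ≤ a)) with
      | some k =>
          some (i + k,
            if (cumsRec l acc).getD k 0 = amount then none
            else some ((l.getD k (0, 0)).1, (l.getD k (0, 0)).2 - ((cumsRec l acc).getD k 0 - amount)))
      | none => none := by
  intro l
  induction l with
  | nil => intro i acc amount; rfl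
  | cons x r ih =>
      intro i acc amount
      rw [aTrimR_cons, cumsRec, List.findIdx?_cons]
      rcases Decidable.em (acc + (x.2 - x.1) > amount) with hgt | hgt
      · rw [if_pos hgt, if_pos (by simp only [decide_eq_true_eq]; omega)]
        dsimp only
        rw [if_neg (by simpa using by omega : ¬((acc + (x.2 - x.1)) :: cumsRec r (acc + (x.2 - x.1))).getD 0 0 = amount)]
        simp only [List.getD_cons_zero, Nat.add_zero, Option.some.injEq, Prod.mk.injEq,
          true_and]
        first
        | trivial
        | omega
      · rcases Decidable.em (acc + (x.2 - x.1) = amount) with heq | heq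
        · rw [if_neg hgt, if_pos heq, if_pos (by simp only [decide_eq_true_eq]; omega)]
          dsimp only
          rw [if_pos (by simpa using heq)]
          simp
        · rw [if_neg hgt, if_neg heq, if_neg (by simp only [decide_eq_true_eq]; omega), ih]
          rcases hk : (cumsRec r (acc + (x.2 - x.1))).findIdx? (fun a => decide (amount ≤ a)) with _ | k
          · rfl
          · dsimp only [Option.map]
            rw [List.getD_cons_succ, List.getD_cons_succ]
            congr 2
            omega

theorem bridgeL : ∀ (l : List (Int × Int)) (i : Nat) (acc amount : Int),
    aTrimL l i acc amount =
      match (cumsRec l acc).findIdx? (fun a => decide (amount ≤ a)) with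
      | some k =>
          some (i + k,
            if (cumsRec l acc).getD k 0 = amount then none
            else some ((l.getD k (0, 0)).1 + ((cumsRec l acc).getD k 0 - amount), (l.getD k (0, 0)).2))
      | none => none := by
  intro l
  induction l with
  | nil => intro i acc amount; rfl
  | cons x r ih =>
      intro i acc amount
      rw [aTrimL_cons, cumsRec, List.findIdx?_cons]
      rcases Decidable.em (acc + (x.2 - x.1) > amount) with hgt | hgt
      · rw [if_pos hgt, if_pos (by simp only [decide_eq_true_eq]; omega)]
        dsimp only
        rw [if_neg (by simpa using by omega : ¬((acc + (x.2 - x.1)) :: cumsRec r (acc + (x.2 - x.1))).getD 0 0 = amount)]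
        simp only [List.getD_cons_zero, Nat.add_zero, Option.some.injEq, Prod.mk.injEq,
          true_and, and_true]
        first
        | trivial
        | omega
      · rcases Decidable.em (acc + (x.2 - x.1) = amount) with heq | heq
        · rw [if_neg hgt, if_pos heq, if_pos (by simp only [decide_eq_true_eq]; omega)]
          dsimp only
          rw [if_pos (by simpa using heq)]
          simp
        · rw [if_neg hgt, if_neg heq, if_neg (by simp only [decide_eq_true_eq]; omega), ih]
          rcases hk : (cumsRec r (acc + (x.2 - x.1))).findIdx? (fun a => decide (amount ≤ a)) with _ | k
          · rfl
          · dsimp only [Option.map]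
            rw [List.getD_cons_succ, List.getD_cons_succ]
            congr 2
            omega

theorem set_drop {l : List (Int × Int)} {k : Nat} (v : Int × Int) (h : k < l.length) :
    (l.set k v).drop k = v :: l.drop (k + 1) := by
  rw [List.drop_eq_getElem_cons (by simpa using h), List.getElem_set_self (by simpa using h)]
  congr 1
  rw [List.drop_set]
  simp

theorem set_take {l : List (Int × Int)} {k : Nat} (v : Int × Int) (h : k < l.length) :
    (l.set k v).take (k + 1) = l.take k ++ [v] := by
  rw [List.set_eq_take_append_cons_drop, if_pos h, List.take_append]
  simp [Nat.min_eq_left (Nat.le_of_lt h), List.length_take]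

theorem take_getD {l : List (Int × Int)} {k : Nat} (h : k < l.length) (d : Int × Int) :
    l.take (k + 1) = l.take k ++ [l.getD k d] := by
  rw [List.take_add_one]
  simp [List.getElem?_eq_getElem h, List.getD]

theorem drop_getD {l : List (Int × Int)} {k : Nat} (h : k < l.length) (d : Int × Int) :
    l.drop k = l.getD k d :: l.drop (k + 1) := by
  rw [List.drop_eq_getElem_cons h]
  simp [List.getD, List.getElem?_eq_getElem h]

theorem reverse_getD {l : List (Int × Int)} {k : Nat} (h : k < l.length) (d : Int × Int) :
    l.reverse.getD k d = l.getD (l.length - 1 - k) d := by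
  simp [List.getD, List.getElem?_reverse h]

-- A's right-trim block equals B's _chopHead
theorem chopHead_eq (bins : List (Int × Int)) (amount : Int) :
    aRightBlock bins amount = bChopHead bins amount := by
  simp only [aRightBlock, bChopHead]
  rw [pvCumsums_eq]
  rcases hb : bins with _ | ⟨x, r⟩
  · -- empty list: both sides reduce by computation
    simp only [cumsRec, pvSumW_nil, List.getLast?_nil, Option.getD_none]
    rcases Decidable.em ((0:Int) > amount) with hgt | hgt
    · rw [if_pos hgt, if_neg (by omega : ¬(0:Int) ≤ amount)]
      rfl
    · rw [if_neg hgt, if_pos (by omega : (0:Int) ≤ amount)]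
      rcases Decidable.em ((0:Int) < amount) with hlt | hlt
      · rw [if_pos hlt]
      · rw [if_neg hlt]
        have h0 : amount = 0 := by omega
        rw [h0]
        rfl
  · rw [← hb]
    have hbne : bins ≠ [] := by rw [hb]; simp
    have htot : (cumsRec bins 0).getLast?.getD 0 = pvSumW bins := by
      rw [cumsRec_getLast bins 0 hbne]
      simp
    rw [htot]
    rcases Decidable.em (pvSumW bins > amount) with hgt | hgt
    · rw [if_pos hgt, if_neg (by omega : ¬pvSumW bins ≤ amount), bridgeR]
      rcases hk : (cumsRec bins 0).findIdx? (fun a => decide (amount ≤ a)) with _ | k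
      · rfl
      · have hkl : k < bins.length := by
          have := List.findIdx?_eq_some_iff_findIdx_eq.1 hk
          have := this.1
          rwa [cumsRec_length] at this
        dsimp only
        rcases Decidable.em ((cumsRec bins 0).getD k 0 = amount) with he | he
        · rw [if_pos he]
          dsimp only
          rw [Nat.zero_add, take_getD hkl (0, 0)]
          congr 2
          have : (cumsRec bins 0).getD k 0 - amount = 0 := by omega
          rw [this]
          simp
        · rw [if_neg he]
          dsimp only
          rw [Nat.zero_add, set_take _ hkl]
    · rw [if_neg hgt, if_pos (by omega : pvSumW bins ≤ amount)]
      rcases Decidable.em (pvSumW bins < amount) with hlt | hlt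
      · rw [if_pos hlt]
      · rw [if_neg hlt]
        have h0 : amount - pvSumW bins = 0 := by omega
        rw [h0]

-- A's left-trim block equals B's _chopTail
theorem chopTail_eq (bins : List (Int × Int)) (amount : Int) :
    aLeftBlock bins amount = bChopTail bins amount := by
  simp only [aLeftBlock, bChopTail]
  rw [pvCumsums_eq]
  rcases hb : bins with _ | ⟨x, r⟩
  · simp only [List.reverse_nil, cumsRec, pvSumW_nil, List.getLast?_nil, Option.getD_none]
    rcases Decidable.em ((0:Int) > amount) with hgt | hgt
    · rw [if_pos hgt, if_neg (by omega : ¬(0:Int) ≤ amount)]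
      rfl
    · rw [if_neg hgt, if_pos (by omega : (0:Int) ≤ amount)]
      rcases Decidable.em ((0:Int) < amount) with hlt | hlt
      · rw [if_pos hlt]
      · rw [if_neg hlt]
        have h0 : amount = 0 := by omega
        rw [h0]
        rfl
  · rw [← hb]
    have hbne : bins ≠ [] := by rw [hb]; simp
    have hrne : bins.reverse ≠ [] := by simpa using hbne
    have htot : (cumsRec bins.reverse 0).getLast?.getD 0 = pvSumW bins := by
      rw [cumsRec_getLast bins.reverse 0 hrne]
      simp [pvSumW_reverse]
    rw [htot]
    rcases Decidable.em (pvSumW bins > amount) with hgt | hgt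
    · rw [if_pos hgt, if_neg (by omega : ¬pvSumW bins ≤ amount), bridgeL]
      rcases hk : (cumsRec bins.reverse 0).findIdx? (fun a => decide (amount ≤ a)) with _ | k
      · rfl
      · have hkl : k < bins.length := by
          have h1 := (List.findIdx?_eq_some_iff_findIdx_eq.1 hk).1
          rwa [cumsRec_length, List.length_reverse] at h1
        have hget : bins.reverse.getD k (0, 0) = bins.getD (bins.length - 1 - k) (0, 0) :=
          reverse_getD (by simpa using hkl) (0, 0)
        have hn1 : bins.length - 1 - k < bins.length := by
          rcases hb with _; omega
        dsimp only
        rw [Nat.zero_add]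
        rcases Decidable.em ((cumsRec bins.reverse 0).getD k 0 = amount) with he | he
        · -- exact fit: no replacement in A, zero-width clip offset in B
          rw [if_pos he]
          dsimp only
          have hzero : (cumsRec bins.reverse 0).getD k 0 - amount = 0 := by omega
          rw [hzero]
          refine Prod.ext ?_ rfl
          show (if k + 1 < bins.length then bins.drop (bins.length - (k + 1)) else bins)
            = ((bins.getD (bins.length - 1 - k) (0, 0)).1 + 0, (bins.getD (bins.length - 1 - k) (0, 0)).2)
                :: bins.drop (bins.length - k)
          have hdrop : bins.drop (bins.length - 1 - k)
              = bins.getD (bins.length - 1 - k) (0, 0) :: bins.drop (bins.length - k) := by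
            rw [drop_getD hn1 (0, 0)]
            congr 2
            omega
          rcases Decidable.em (k + 1 < bins.length) with hlt | hlt
          · rw [if_pos hlt, show bins.length - (k + 1) = bins.length - 1 - k from by omega, hdrop]
            simp
          · rw [if_neg hlt]
            have hj0 : bins.length - 1 - k = 0 := by omega
            rw [hj0] at hdrop ⊢
            simp only [List.drop_zero] at hdrop
            conv_lhs => rw [hdrop]
            simp
        · -- proper clip: A replaces the boundary bin in place, B builds it directly
          rw [if_neg he]
          dsimp only
          rw [hget]
          refine Prod.ext ?_ rfl
          show (if k + 1 < (bins.set (bins.length - 1 - k) _).length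
                then (bins.set (bins.length - 1 - k) _).drop ((bins.set (bins.length - 1 - k) _).length - (k + 1))
                else bins.set (bins.length - 1 - k) _)
            = _ :: bins.drop (bins.length - k)
          simp only [List.length_set]
          have hsd := set_drop (l := bins)
            ((bins.getD (bins.length - 1 - k) (0, 0)).1 + ((cumsRec bins.reverse 0).getD k 0 - amount),
              (bins.getD (bins.length - 1 - k) (0, 0)).2) hn1
          have hidx : bins.length - 1 - k + 1 = bins.length - k := by omega
          rw [hidx] at hsd
          rcases Decidable.em (k + 1 < bins.length) with hlt | hlt
          · rw [if_pos hlt, show bins.length - (k + 1) = bins.length - 1 - k from by omega, hsd]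
          · rw [if_neg hlt]
            have hj0 : bins.length - 1 - k = 0 := by omega
            rw [hj0] at hsd ⊢
            simp only [List.drop_zero] at hsd
            exact hsd
    · rw [if_neg hgt, if_pos (by omega : pvSumW bins ≤ amount)]
      rcases Decidable.em (pvSumW bins < amount) with hlt | hlt
      · rw [if_pos hlt]
      · rw [if_neg hlt]
        have h0 : amount - pvSumW bins = 0 := by omega
        rw [h0]

-- A's split step equals B's split step pointwise
theorem step_eq (m : Int) (st : List (Int × Int) × List (Int × Int) × Int) (x : Int × Int) :
    aStep m st x = bStep m st x := by
  simp only [aStep, bStep]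
  by_cases hc1 : st.2.2 ≥ m
  · rw [if_pos hc1, if_neg (by omega : ¬st.2.2 < m), if_pos (Or.inl hc1)]
    refine Prod.ext rfl (Prod.ext ?_ rfl)
    simp [Prod.ext_iff]
    omega
  · rw [if_neg hc1, if_pos (by omega : st.2.2 < m)]
    by_cases hc2 : st.2.2 + (x.2 - x.1) < m
    · rw [if_pos (by omega : st.2.2 + (x.2 - x.1) < m),
        if_neg (by omega : ¬(st.2.2 ≥ m ∨ st.2.2 + (x.2 - x.1) > m))]
      refine Prod.ext ?_ rfl
      simp [Prod.ext_iff]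
      omega
    · rw [if_neg hc2]
      by_cases hc3 : st.2.2 + (x.2 - x.1) > m
      · rw [if_pos (by omega : x.1 < x.2 - st.2.2 - (x.2 - x.1) + m),
          if_pos (by omega : x.2 - st.2.2 - (x.2 - x.1) + m < x.2),
          if_pos (Or.inr hc3)]
        refine Prod.ext ?_ (Prod.ext ?_ rfl)
        · simp [Prod.ext_iff]; omega
        · simp [Prod.ext_iff]; omega
      · rw [if_pos (by omega : x.1 < x.2 - st.2.2 - (x.2 - x.1) + m),
          if_neg (by omega : ¬x.2 - st.2.2 - (x.2 - x.1) + m < x.2),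
          if_neg (by omega : ¬(st.2.2 ≥ m ∨ st.2.2 + (x.2 - x.1) > m))]
        refine Prod.ext ?_ rfl
        simp [Prod.ext_iff]
        omega

-- ===== VERDICT (by name: the statement is the Claim_ definition above) =====
theorem chopRegionsFromMiddle_spec : Claim_equal_chopRegionsFromMiddle := by
  intro exonsInput left right _ _
  unfold Spec_chopRegionsFromMiddle
  simp only [chopRegionsFromMiddle, chopRegionsFromMiddle_alt]
  have hstep : aStep (PySem.Int.floordiv (pvSumW exonsInput) 2)
      = bStep (PySem.Int.floordiv (pvSumW exonsInput) 2) :=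
    funext fun st => funext fun x => step_eq _ st x
  rw [hstep, chopTail_eq, chopHead_eq]
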